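-- pv_equiv track=rewrite | github.com/brayanrodbajo/MERApp-analysis | preprocess.py | m_scrolls
-- ===== SOURCE A (Python) =====
-- def m_scrolls(scrolls):
--     sc_ant = 0
--     sc_down = 0
--     sc_down_d = 0
--     sc_up = 0
--     sc_up_d = 0
--     for sc in scrolls:
--         if sc > sc_ant:
--             sc_down+=1
--             sc_down_d+=sc-sc_ant
--         elif sc_ant > sc:
--             sc_up+=1
--             sc_up_d+=sc_ant-sc
--         sc_ant = sc
--
--     return (sc_up_d, sc_up, sc_down_d, sc_down)
-- ===== SOURCE B (Python) =====
-- def m_scrolls(scrolls):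
--     # Telescoping: down_sum - up_sum = last path value; down_sum + up_sum = total variation.
--     xs = [0] + list(scrolls)
--     tv = sum(abs(b - a) for a, b in zip(xs, xs[1:]))
--     downs = sum(a < b for a, b in zip(xs, xs[1:]))
--     ups = sum(b < a for a, b in zip(xs, xs[1:]))
--     last = xs[-1]
--     return ((tv - last) // 2, ups, (tv + last) // 2, downs)
-- ===== Notes on version B (the rewrite author's own statement) =====
-- stated objective: alternative
-- what changed: B never accumulates the scroll deltas: it derives both delta sums by a closed-form telescoping identity (down_sum - up_sum = last value, down_sum + up_sum = total variation), computing only the total variation, the last value and the ascent/descent counts, where A sums the positive and negative deltas directly in a stateful loop.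
import Mathlib
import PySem

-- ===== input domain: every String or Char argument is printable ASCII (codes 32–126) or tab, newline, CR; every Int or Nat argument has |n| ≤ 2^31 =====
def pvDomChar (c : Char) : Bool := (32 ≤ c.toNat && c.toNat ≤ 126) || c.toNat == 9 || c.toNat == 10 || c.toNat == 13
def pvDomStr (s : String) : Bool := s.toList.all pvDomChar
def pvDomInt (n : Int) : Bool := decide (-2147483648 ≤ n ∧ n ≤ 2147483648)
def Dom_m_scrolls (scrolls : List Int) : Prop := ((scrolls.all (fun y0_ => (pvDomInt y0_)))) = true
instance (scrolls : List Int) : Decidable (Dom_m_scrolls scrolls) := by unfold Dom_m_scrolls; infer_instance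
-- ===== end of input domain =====

-- B derives both delta sums by the telescoping identity (down_sum - up_sum = last value,
-- down_sum + up_sum = total variation) instead of accumulating them in A's stateful loop
-- (objective: alternative).

-- ===== PORT A =====
-- state: (sc_ant, sc_down, sc_down_d, sc_up, sc_up_d)
def m_scrolls (scrolls : List Int) : Int × Int × Int × Int :=
  let s := scrolls.foldl
    (fun (st : Int × Int × Int × Int × Int) sc =>
      let (sc_ant, sc_down, sc_down_d, sc_up, sc_up_d) := st
      if sc > sc_ant then (sc, sc_down + 1, sc_down_d + (sc - sc_ant), sc_up, sc_up_d)
      else if sc_ant > sc then (sc, sc_down, sc_down_d, sc_up + 1, sc_up_d + (sc_ant - sc))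
      else (sc, sc_down, sc_down_d, sc_up, sc_up_d))
    (0, 0, 0, 0, 0)
  (s.2.2.2.2, s.2.2.2.1, s.2.2.1, s.2.1)

-- ===== PORT B =====
-- xs[1:] where xs = 0 :: scrolls is scrolls; xs[-1] on the (always nonempty) xs is its last
-- element; Python's 'sum(a < b ...)' adds booleans as 0/1; '//' is PySem.Int.floordiv.
def m_scrolls_alt (scrolls : List Int) : Int × Int × Int × Int :=
  let xs : List Int := 0 :: scrolls
  let tv := (List.zipWith (fun a b => |b - a|) xs scrolls).sum
  let downs := (List.zipWith (fun a b => if a < b then (1 : Int) else 0) xs scrolls).sum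
  let ups := (List.zipWith (fun a b => if b < a then (1 : Int) else 0) xs scrolls).sum
  let last := xs.getLast (by simp)
  (PySem.Int.floordiv (tv - last) 2, ups, PySem.Int.floordiv (tv + last) 2, downs)

-- ===== PRECONDITION & SPEC =====
def Spec_m_scrolls (scrolls : List Int) (out : Int × Int × Int × Int) : Prop := out = m_scrolls_alt scrolls
instance (scrolls : List Int) (out : Int × Int × Int × Int) : Decidable (Spec_m_scrolls scrolls out) := by unfold Spec_m_scrolls; infer_instance

-- ===== CLAIM (what is proved, stated in full; the proofs are below) =====
def Claim_equal_m_scrolls : Prop := ∀ (scrolls : List Int), Dom_m_scrolls scrolls → Spec_m_scrolls scrolls (m_scrolls scrolls)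

-- ===== LEMMAS AND PROOFS =====

-- A's loop from an arbitrary state adds the filtered sums/counts of the consecutive diffs
theorem m_scrolls_loop (l : List Int) (a d dd u ud : Int) :
    l.foldl
      (fun (st : Int × Int × Int × Int × Int) sc =>
        let (sc_ant, sc_down, sc_down_d, sc_up, sc_up_d) := st
        if sc > sc_ant then (sc, sc_down + 1, sc_down_d + (sc - sc_ant), sc_up, sc_up_d)
        else if sc_ant > sc then (sc, sc_down, sc_down_d, sc_up + 1, sc_up_d + (sc_ant - sc))
        else (sc, sc_down, sc_down_d, sc_up, sc_up_d))
      (a, d, dd, u, ud)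
    = (let diffs := List.zipWith (fun x y => y - x) (a :: l) l
       ((a :: l).getLast (by simp),
        d + ((diffs.filter (fun x => x > 0)).map (fun _ => (1 : Int))).sum,
        dd + ((diffs.filter (fun x => x > 0)).map (fun x => x)).sum,
        u + ((diffs.filter (fun x => x < 0)).map (fun _ => (1 : Int))).sum,
        ud + ((diffs.filter (fun x => x < 0)).map (fun x => -x)).sum)) := by
  induction l generalizing a d dd u ud with
  | nil => simp
  | cons x t ih =>
    simp only [List.foldl_cons, List.zipWith]
    by_cases h1 : x > a
    · have hp : x - a > 0 := by omega
      have hn : ¬ (x - a < 0) := by omega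
      simp only [if_pos h1, ih, List.filter_cons, hp, hn, decide_true, decide_false,
        if_true, List.map_cons, List.sum_cons, Prod.mk.injEq]
      refine ⟨rfl, by ring, by ring, rfl, rfl⟩
    · by_cases h2 : a > x
      · have hp : ¬ (x - a > 0) := by omega
        have hn : x - a < 0 := by omega
        simp only [if_neg h1, if_pos h2, ih, List.filter_cons, hp, hn, decide_true,
          decide_false, if_true, List.map_cons, List.sum_cons, Prod.mk.injEq]
        refine ⟨rfl, rfl, rfl, by ring, by ring⟩
      · have hp : ¬ (x - a > 0) := by omega
        have hn : ¬ (x - a < 0) := by omega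
        simp only [if_neg h1, if_neg h2, ih, List.filter_cons, hp, hn, decide_false,
          Prod.mk.injEq]
        exact ⟨rfl, rfl, rfl, rfl, rfl⟩

-- bridge: total variation, telescoped last value and the pairwise comparison counts, in terms
-- of the filtered diff sums/counts
theorem tv_bridge (l : List Int) (a : Int) :
    (let diffs := List.zipWith (fun x y => y - x) (a :: l) l
     let P := ((diffs.filter (fun x => x > 0)).map (fun x => x)).sum
     let N := ((diffs.filter (fun x => x < 0)).map (fun x => -x)).sum
     (List.zipWith (fun x y => |y - x|) (a :: l) l).sum = P + N ∧
     (a :: l).getLast (by simp) - a = P - N ∧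
     (List.zipWith (fun x y => if x < y then (1 : Int) else 0) (a :: l) l).sum
       = ((diffs.filter (fun x => x > 0)).map (fun _ => (1 : Int))).sum ∧
     (List.zipWith (fun x y => if y < x then (1 : Int) else 0) (a :: l) l).sum
       = ((diffs.filter (fun x => x < 0)).map (fun _ => (1 : Int))).sum) := by
  induction l generalizing a with
  | nil => simp
  | cons x t ih =>
    obtain ⟨h1, h2, h3, h4⟩ := ih x
    have hlast : (a :: x :: t).getLast (by simp) = (x :: t).getLast (by simp) := by
      simp [List.getLast]
    simp only [List.zipWith, List.filter_cons, List.sum_cons] at *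
    rcases lt_trichotomy a x with h | h | h
    · have hp : x - a > 0 := by omega
      have hn : ¬ (x - a < 0) := by omega
      simp only [hp, hn, decide_true, decide_false, Bool.false_eq_true, if_true, if_false, List.map_cons, List.sum_cons,
        hlast, abs_of_pos (by omega : (0:Int) < x - a), if_pos h,
        if_neg (by omega : ¬ x < a)]
      refine ⟨by omega, by omega, by omega, by omega⟩
    · have hp : ¬ (x - a > 0) := by omega
      have hn : ¬ (x - a < 0) := by omega
      simp only [hp, hn, decide_false, Bool.false_eq_true, if_false, hlast,
        if_neg (by omega : ¬ a < x), if_neg (by omega : ¬ x < a)]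
      have habs : |x - a| = 0 := by simp; omega
      rw [habs]
      refine ⟨by omega, by omega, by omega, by omega⟩
    · have hp : ¬ (x - a > 0) := by omega
      have hn : x - a < 0 := by omega
      simp only [hp, hn, decide_true, decide_false, Bool.false_eq_true, if_true, if_false, List.map_cons, List.sum_cons,
        hlast, abs_of_neg (by omega : x - a < (0:Int)),
        if_neg (by omega : ¬ a < x), if_pos h]
      refine ⟨by omega, by omega, by omega, by omega⟩

-- ===== VERDICT (by name: the statement is the Claim_ definition above) =====
theorem m_scrolls_spec : Claim_equal_m_scrolls := by
  intro scrolls _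
  unfold Spec_m_scrolls m_scrolls m_scrolls_alt
  obtain ⟨h1, h2, h3, h4⟩ := tv_bridge scrolls 0
  simp only [m_scrolls_loop]
  rw [h3, h4]
  have hflo : ∀ m : Int, PySem.Int.floordiv (2 * m) 2 = m := by
    intro m
    rw [PySem.Int.floordiv_eq_ediv_of_pos (by omega)]
    omega
  simp only [Prod.mk.injEq, zero_add]
  refine ⟨?_, trivial, ?_, trivial⟩
  · have e : (List.zipWith (fun x y => |y - x|) ((0:Int) :: scrolls) scrolls).sum
        - ((0:Int) :: scrolls).getLast (by simp)
        = 2 * ((((List.zipWith (fun x y => y - x) ((0:Int) :: scrolls) scrolls).filter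
            (fun x => x < 0)).map (fun x => -x)).sum) := by omega
    rw [e, hflo]
  · have e : (List.zipWith (fun x y => |y - x|) ((0:Int) :: scrolls) scrolls).sum
        + ((0:Int) :: scrolls).getLast (by simp)
        = 2 * ((((List.zipWith (fun x y => y - x) ((0:Int) :: scrolls) scrolls).filter
            (fun x => x > 0)).map (fun x => x)).sum) := by omega
    rw [e, hflo]
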